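-- pv_equiv track=rewrite | github.com/nicosnow-cl/improved-bwacs | main_new.py | generate_solution_arcs
-- ===== SOURCE A (Python) =====
-- def generate_solution_arcs(solution):
--     solution_arcs = []
--
--     for route in solution:
--         route_arcs = []
--
--         for pos, i in enumerate(route):
--             if pos == 0:
--                 before_node = i
--             else:
--                 route_arcs.append((before_node, i))
--                 before_node = i
--
--         solution_arcs.append(route_arcs)
--
--     return solution_arcs
-- ===== SOURCE B (Python) =====
-- def generate_solution_arcs(solution):
--     return [list(zip(route, route[1:])) for route in solution]
-- ===== Notes on version B (the rewrite author's own statement) =====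
-- stated objective: idiomatic
-- what changed: Replaces the nested loop with a before_node accumulator and pos==0 branch by a comprehension pairing each route with its own tail via zip.
import Mathlib
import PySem

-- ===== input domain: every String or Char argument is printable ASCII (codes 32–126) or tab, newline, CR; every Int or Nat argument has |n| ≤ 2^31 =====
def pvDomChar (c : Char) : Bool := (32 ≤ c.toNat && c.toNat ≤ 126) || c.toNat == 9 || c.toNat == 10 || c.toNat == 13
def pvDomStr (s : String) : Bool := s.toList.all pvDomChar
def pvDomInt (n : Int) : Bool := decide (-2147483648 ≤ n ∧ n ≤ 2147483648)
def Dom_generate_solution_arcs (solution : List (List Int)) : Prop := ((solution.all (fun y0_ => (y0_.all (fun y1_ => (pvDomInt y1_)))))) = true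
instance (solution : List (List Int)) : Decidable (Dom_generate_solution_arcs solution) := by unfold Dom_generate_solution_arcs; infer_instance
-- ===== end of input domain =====

-- B replaces the before_node accumulator loop by zipping each route with its tail (idiomatic).
-- ===== PORT A =====
-- inner loop of A: state (route_arcs, before_node); pos == 0 ↔ before_node is none
def arcsLoop (route : List Int) (acc : List (Int × Int)) (before : Option Int) :
    List (Int × Int) :=
  match route with
  | [] => acc
  | i :: rest =>
    match before with
    | none => arcsLoop rest acc (some i)
    | some b => arcsLoop rest (acc ++ [(b, i)]) (some i)

def generate_solution_arcs (solution : List (List Int)) : List (List (Int × Int)) :=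
  solution.foldl (fun solution_arcs route => solution_arcs ++ [arcsLoop route [] none]) []

-- ===== PORT B =====
def generate_solution_arcs_alt (solution : List (List Int)) : List (List (Int × Int)) :=
  solution.map (fun route => route.zip route.tail)

-- ===== PRECONDITION & SPEC =====
def Spec_generate_solution_arcs (solution : List (List Int)) (out : List (List (Int × Int))) : Prop := out = generate_solution_arcs_alt solution
instance (solution : List (List Int)) (out : List (List (Int × Int))) : Decidable (Spec_generate_solution_arcs solution out) := by unfold Spec_generate_solution_arcs; infer_instance

-- ===== CLAIM (what is proved, stated in full; the proofs are below) =====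
def Claim_equal_generate_solution_arcs : Prop := ∀ (solution : List (List Int)), Dom_generate_solution_arcs solution → Spec_generate_solution_arcs solution (generate_solution_arcs solution)

-- ===== LEMMAS AND PROOFS =====

-- ===== VERDICT (by name: the statement is the Claim_ definition above) =====
theorem arcsLoop_some (rest : List Int) (acc : List (Int × Int)) (b : Int) :
    arcsLoop rest acc (some b) = acc ++ (b :: rest).zip rest := by
  induction rest generalizing acc b with
  | nil => simp [arcsLoop]
  | cons i t ih => simp [arcsLoop, ih, List.zip]

theorem arcsLoop_eq_zip (route : List Int) :
    arcsLoop route [] none = route.zip route.tail := by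
  cases route with
  | nil => rfl
  | cons i rest => simp [arcsLoop, arcsLoop_some]

theorem foldl_append_singleton (l : List (List Int)) (acc : List (List (Int × Int))) :
    l.foldl (fun solution_arcs route => solution_arcs ++ [arcsLoop route [] none]) acc =
      acc ++ l.map (fun route => route.zip route.tail) := by
  induction l generalizing acc with
  | nil => simp
  | cons r t ih => rw [List.foldl_cons, ih]; simp [arcsLoop_eq_zip]

theorem generate_solution_arcs_spec : Claim_equal_generate_solution_arcs := by
  intro solution _
  unfold Spec_generate_solution_arcs generate_solution_arcs generate_solution_arcs_alt
  simpa using foldl_append_singleton solution []
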